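-- pv_equiv track=rewrite | github.com/vncloudsco/splunk | lib/python2.7/site-packages/splunk/mining/interactivedates.py | buildPythonRegex
-- ===== SOURCE A (Python) =====
-- MAXPREFIX = 7  # PREFIX REGEX WITH AT MOST 7 CHARS BACK
--
-- def makeregex(text):
--     regex = ""
--     addedPlus = False
--     lastchtype = None
--     for ch in text:
--         if ch.isalpha():
--             chtype = "\w"
--         elif ch.isdigit():
--             chtype = "\d+"
--             addedPlus = True
--         elif ch.isspace():
--             chtype = "\s"
--         else:
--             if ch in "[](){}?*.^+<>":
--                 chtype = "\\" + ch
--             else: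
--                 chtype = ch
--         if lastchtype == chtype:
--             if not addedPlus:
--                 regex += "+"
--                 addedPlus = True
--         else:
--             regex += chtype
--             addedPlus = False
--         lastchtype = chtype
--     return regex
--
-- def buildPythonRegex(fieldAndPos, valueDict, line):
--     lastpos = 0
--     count = 0
--     extractions = ""
--     regex = ""
--     for field, pos in fieldAndPos:
--         value = valueDict[field]
--         if field == "month" and not value.isdigit():
--             field = "litmonth"
--         start = pos
--         if lastpos == 0 and start - lastpos > MAXPREFIX:
--             lastpos = start - MAXPREFIX
--         prefix = line[lastpos:start]
--         prefixregex = makeregex(prefix)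
--         valueregex = makeregex(value)
--         regex += str(prefixregex) + "(?P<" + str(field) + ">" + str(valueregex) + ")"
--         extractions += field + ","
--         lastpos = start + len(value)
--     return regex
-- ===== SOURCE B (Python) =====
-- MAXPREFIX = 7  # PREFIX REGEX WITH AT MOST 7 CHARS BACK
--
--
-- def _token(ch):
--     if ch.isalpha():
--         return "\\w"
--     if ch.isdigit():
--         return "\\d+"
--     if ch.isspace():
--         return "\\s"
--     return "\\" + ch if ch in "[](){}?*.^+<>" else ch
--
--
-- def makeregex(text):
--     # two-phase: tokenize every character, then emit maximal runs of equal tokens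
--     tokens = [_token(ch) for ch in text]
--     parts = []
--     i, n = 0, len(tokens)
--     while i < n:
--         j = i + 1
--         while j < n and tokens[j] == tokens[i]:
--             j += 1
--         tok = tokens[i]
--         parts.append(tok if tok == "\\d+" or j - i == 1 else tok + "+")
--         i = j
--     return "".join(parts)
--
--
-- def buildPythonRegex(fieldAndPos, valueDict, line):
--     pieces = []
--     lastpos = 0
--     for field, pos in fieldAndPos:
--         value = valueDict[field]
--         name = "litmonth" if field == "month" and not value.isdigit() else field
--         cut = pos - MAXPREFIX if lastpos == 0 and pos > MAXPREFIX else lastpos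
--         pieces.append(makeregex(line[cut:pos]) + "(?P<" + name + ">" + makeregex(value) + ")")
--         lastpos = pos + len(value)
--     return "".join(pieces)
-- ===== Notes on version B (the rewrite author's own statement) =====
-- stated objective: alternative
-- what changed: makeregex is rebuilt as a two-phase traversal (tokenize every character, then group maximal runs of equal tokens and emit each run once) replacing the per-character state machine with lastchtype/addedPlus flags, and the outer loop collects pieces joined at the end instead of string-accumulating regex and the dead extractions variable.
-- outside the precondition, e.g. on buildPythonRegex([('day', 3)], {'month': 'Jan'}, 'on Jan'): A raises KeyError, B raises KeyError
import Mathlib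
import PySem

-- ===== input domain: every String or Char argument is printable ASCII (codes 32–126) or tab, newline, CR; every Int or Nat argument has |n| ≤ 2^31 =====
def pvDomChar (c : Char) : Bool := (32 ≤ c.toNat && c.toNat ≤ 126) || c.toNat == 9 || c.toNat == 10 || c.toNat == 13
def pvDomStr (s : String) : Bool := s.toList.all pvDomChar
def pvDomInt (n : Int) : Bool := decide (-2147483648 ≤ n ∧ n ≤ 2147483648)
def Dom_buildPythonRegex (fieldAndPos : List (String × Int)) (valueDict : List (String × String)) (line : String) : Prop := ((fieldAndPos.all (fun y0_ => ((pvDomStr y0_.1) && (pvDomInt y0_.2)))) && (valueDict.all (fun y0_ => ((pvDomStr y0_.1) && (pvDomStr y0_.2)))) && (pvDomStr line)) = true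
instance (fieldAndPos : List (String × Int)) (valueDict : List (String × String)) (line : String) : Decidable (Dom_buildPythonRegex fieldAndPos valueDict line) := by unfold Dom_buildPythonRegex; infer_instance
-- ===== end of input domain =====

-- B restructures makeregex into a two-phase tokenize-then-group-runs traversal (and the outer
-- loop into pieces + join, same guards); objective: alternative decomposition, not speed.

def pvMAXPREFIX : Int := 7  -- PREFIX REGEX WITH AT MOST 7 CHARS BACK

-- ===== PORT A =====
-- makeregex: per-character state machine; state = (regex, addedPlus, lastchtype)
def pvMkAStep (st : List Char × Bool × Option (List Char)) (ch : Char) : List Char × Bool × Option (List Char) :=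
  let regex := st.1
  let addedPlus0 := st.2.1
  let lastchtype := st.2.2
  let p : List Char × Bool :=
    if PySem.Chars.isalpha ch then ("\\w".toList, addedPlus0)
    else if PySem.Chars.isdigit ch then ("\\d+".toList, true)
    else if PySem.Chars.isspace ch then ("\\s".toList, addedPlus0)
    else if "[](){}?*.^+<>".toList.contains ch then ('\\' :: [ch], addedPlus0)
    else ([ch], addedPlus0)
  let chtype := p.1
  let addedPlus := p.2
  if lastchtype = some chtype then
    if !addedPlus then (regex ++ ['+'], true, some chtype)
    else (regex, addedPlus, some chtype)
  else (regex ++ chtype, false, some chtype)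

def pvMakeregexA (text : List Char) : List Char :=
  (text.foldl pvMkAStep ([], false, none)).1

def buildPythonRegex (fieldAndPos : List (String × Int)) (valueDict : List (String × String)) (line : String) : String :=
  -- state = (lastpos, extractions, regex); value lookup is a KeyError outside Pre_
  let st := fieldAndPos.foldl (fun (st : Int × List Char × List Char) fp =>
    let lastpos0 := st.1
    let extractions := st.2.1
    let regex := st.2.2
    let field0 := fp.1
    let value := ((PySem.Dict.mk valueDict).get? field0).getD ""
    let field := if field0 = "month" ∧ ¬ (PySem.Str.strIsdigit value = true) then "litmonth" else field0
    let start := fp.2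
    let lastpos := if lastpos0 = 0 ∧ start - lastpos0 > pvMAXPREFIX then start - pvMAXPREFIX else lastpos0
    let prefixregex := pvMakeregexA (PySem.List.slice line.toList (some lastpos) (some start))
    let valueregex := pvMakeregexA value.toList
    (start + (value.toList.length : Int),
     extractions ++ field.toList ++ [','],
     regex ++ prefixregex ++ "(?P<".toList ++ field.toList ++ ">".toList ++ valueregex ++ ")".toList))
    (0, [], [])
  String.ofList st.2.2

-- ===== PORT B =====
def pvToken (ch : Char) : List Char :=
  if PySem.Chars.isalpha ch then "\\w".toList
  else if PySem.Chars.isdigit ch then "\\d+".toList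
  else if PySem.Chars.isspace ch then "\\s".toList
  else if "[](){}?*.^+<>".toList.contains ch then '\\' :: [ch]
  else [ch]

-- maximal runs of equal tokens: the head token's run, then the rest
def pvGroupEmit : List (List Char) → List (List Char)
  | [] => []
  | t :: rest =>
    let run := rest.takeWhile (· = t)
    (if t = "\\d+".toList ∨ run.isEmpty then t else t ++ ['+']) :: pvGroupEmit (rest.dropWhile (· = t))
  termination_by ts => ts.length
  decreasing_by
    have := List.length_dropWhile_le (· = t) rest
    simp_wf
    omega

def pvMakeregexB (text : List Char) : List Char :=
  (pvGroupEmit (text.map pvToken)).flatten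

def buildPythonRegex_alt (fieldAndPos : List (String × Int)) (valueDict : List (String × String)) (line : String) : String :=
  -- state = (lastpos, pieces); join of the pieces at the end
  let st := fieldAndPos.foldl (fun (st : Int × List (List Char)) fp =>
    let lastpos := st.1
    let field := fp.1
    let pos := fp.2
    let value := ((PySem.Dict.mk valueDict).get? field).getD ""
    let name := if field = "month" ∧ ¬ (PySem.Str.strIsdigit value = true) then "litmonth" else field
    let cut := if lastpos = 0 ∧ pos > pvMAXPREFIX then pos - pvMAXPREFIX else lastpos
    let piece := pvMakeregexB (PySem.List.slice line.toList (some cut) (some pos)) ++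
      "(?P<".toList ++ name.toList ++ ">".toList ++ pvMakeregexB value.toList ++ ")".toList
    (pos + (value.toList.length : Int), st.2 ++ [piece]))
    (0, [])
  String.ofList st.2.flatten

-- ===== PRECONDITION & SPEC =====
-- Pre_ excludes inputs where some field is not a key of valueDict: there Python's valueDict[field] raises KeyError.
def Pre_buildPythonRegex (fieldAndPos : List (String × Int)) (valueDict : List (String × String)) (_line : String) : Prop :=
  ∀ fp ∈ fieldAndPos, ((PySem.Dict.mk valueDict).get? fp.1).isSome = true
instance (fieldAndPos : List (String × Int)) (valueDict : List (String × String)) (line : String) : Decidable (Pre_buildPythonRegex fieldAndPos valueDict line) := by unfold Pre_buildPythonRegex; infer_instance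

def pvWitness_buildPythonRegex : (List (String × Int)) × (List (String × String)) × String :=
  ([("month", 3), ("day", 8)], [("month", "Jan"), ("day", "15")], "on Jan 15, ok")

def Spec_buildPythonRegex (fieldAndPos : List (String × Int)) (valueDict : List (String × String)) (line : String) (out : String) : Prop := out = buildPythonRegex_alt fieldAndPos valueDict line
instance (fieldAndPos : List (String × Int)) (valueDict : List (String × String)) (line : String) (out : String) : Decidable (Spec_buildPythonRegex fieldAndPos valueDict line out) := by unfold Spec_buildPythonRegex; infer_instance

-- ===== CLAIM (what is proved, stated in full; the proofs are below) =====
def Claim_equal_buildPythonRegex : Prop := ∀ (fieldAndPos : List (String × Int)) (valueDict : List (String × String)) (line : String), Dom_buildPythonRegex fieldAndPos valueDict line → Pre_buildPythonRegex fieldAndPos valueDict line → Spec_buildPythonRegex fieldAndPos valueDict line (buildPythonRegex fieldAndPos valueDict line)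

-- ===== LEMMAS AND PROOFS =====

-- A's step depends on the character only through its token
def pvStepT (st : List Char × Bool × Option (List Char)) (t : List Char) : List Char × Bool × Option (List Char) :=
  let addedPlus := if t = "\\d+".toList then true else st.2.1
  if st.2.2 = some t then
    if !addedPlus then (st.1 ++ ['+'], true, some t)
    else (st.1, addedPlus, some t)
  else (st.1 ++ t, false, some t)

theorem pvMkAStep_eq (st : List Char × Bool × Option (List Char)) (ch : Char) :
    pvMkAStep st ch = pvStepT st (pvToken ch) := by
  unfold pvMkAStep pvStepT pvToken
  by_cases h1 : PySem.Chars.isalpha ch = true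
  · simp [h1]
  · by_cases h2 : PySem.Chars.isdigit ch = true
    · simp [h1, h2]
    · by_cases h3 : PySem.Chars.isspace ch = true
      · simp [h1, h2, h3]
      · by_cases h4 : ch = '[' ∨ ch = ']' ∨ ch = '(' ∨ ch = ')' ∨ ch = '{' ∨ ch = '}' ∨ ch = '?' ∨ ch = '*' ∨ ch = '.' ∨ ch = '^' ∨ ch = '+' ∨ ch = '<' ∨ ch = '>'
        · simp [h1, h2, h3, h4]
        · simp [h1, h2, h3, h4]

-- processing tokens all equal to t from an (·, true, some t) state changes nothing
theorem pvFoldT_run_true (t : List Char) :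
    ∀ (run : List (List Char)), (∀ x ∈ run, x = t) → ∀ r,
      run.foldl pvStepT (r, true, some t) = (r, true, some t) := by
  intro run
  induction run with
  | nil => intro _ r; rfl
  | cons x xs ih =>
    intro h r
    have hx : x = t := h x (by simp)
    subst hx
    have e : ("\\d+".toList : List Char) = ['\\', 'd', '+'] := rfl
    have this : pvStepT (r, true, some x) x = (r, true, some x) := by
      unfold pvStepT
      by_cases hd : x = ['\\', 'd', '+'] <;> simp [e, hd]
    simp only [List.foldl_cons, this]
    exact ih (fun y hy => h y (by simp [hy])) r

-- processing a run of token t right after t was emitted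
theorem pvFoldT_run (t : List Char) (run : List (List Char)) (h : ∀ x ∈ run, x = t) (r : List Char) :
    ∃ ap, run.foldl pvStepT (r, false, some t) =
      (r ++ (if t = "\\d+".toList ∨ run.isEmpty then [] else ['+']), ap, some t) := by
  cases run with
  | nil => exact ⟨false, by simp⟩
  | cons x xs =>
    have hx : x = t := h x (by simp)
    subst hx
    have hxs : ∀ y ∈ xs, y = x := fun y hy => h y (by simp [hy])
    have e : ("\\d+".toList : List Char) = ['\\', 'd', '+'] := rfl
    by_cases hd : x = ['\\', 'd', '+']
    · refine ⟨true, ?_⟩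
      have hstep : pvStepT (r, false, some x) x = (r, true, some x) := by
        unfold pvStepT; simp [e, hd]
      simp only [List.foldl_cons, hstep, pvFoldT_run_true x xs hxs r]
      simp [e, hd]
    · refine ⟨true, ?_⟩
      have hstep : pvStepT (r, false, some x) x = (r ++ ['+'], true, some x) := by
        unfold pvStepT; simp [e, hd]
      simp only [List.foldl_cons, hstep, pvFoldT_run_true x xs hxs (r ++ ['+'])]
      simp [e, hd]

theorem pvHead_dropWhile_ne (t : List Char) :
    ∀ (l : List (List Char)) (u : List Char),
      (l.dropWhile (· = t)).head? = some u → ¬ u = t := by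
  intro l
  induction l with
  | nil => intro u h; simp at h
  | cons x xs ih =>
    intro u h
    by_cases hx : x = t
    · rw [List.dropWhile_cons_of_pos (by simp [hx])] at h
      exact ih u h
    · rw [List.dropWhile_cons_of_neg (by simp [hx])] at h
      simp at h
      subst h; exact hx

theorem pvFoldT_group :
    ∀ (ts : List (List Char)) (r : List Char) (ap : Bool) (last : Option (List Char)),
      (∀ t, ts.head? = some t → ¬ last = some t) →
      (ts.foldl pvStepT (r, ap, last)).1 = r ++ (pvGroupEmit ts).flatten := by
  intro ts
  induction ts using pvGroupEmit.induct with
  | case1 => intro r ap last _; simp [pvGroupEmit]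
  | case2 t rest ih =>
    intro r ap last hlast
    have hne : ¬ last = some t := hlast t rfl
    have hstep : pvStepT (r, ap, last) t = (r ++ t, false, some t) := by
      unfold pvStepT; simp [hne]
    have hsplit : rest = rest.takeWhile (· = t) ++ rest.dropWhile (· = t) :=
      (List.takeWhile_append_dropWhile).symm
    have hrun : ∀ x ∈ rest.takeWhile (· = t), x = t := by
      intro x hx
      have := List.mem_takeWhile_imp hx
      simpa using this
    obtain ⟨ap2, hrunEq⟩ := pvFoldT_run t (rest.takeWhile (· = t)) hrun (r ++ t)
    have hrest2 : ∀ u, (rest.dropWhile (· = t)).head? = some u → ¬ (some t : Option (List Char)) = some u := by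
      intro u hu hcontra
      have := pvHead_dropWhile_ne t rest u hu
      exact this (by injection hcontra with h; exact h.symm)
    calc ((t :: rest).foldl pvStepT (r, ap, last)).1
        = (rest.foldl pvStepT (r ++ t, false, some t)).1 := by
          simp only [List.foldl_cons, hstep]
      _ = ((rest.takeWhile (· = t) ++ rest.dropWhile (· = t)).foldl pvStepT (r ++ t, false, some t)).1 := by
          rw [← hsplit]
      _ = ((rest.dropWhile (· = t)).foldl pvStepT
            (r ++ t ++ (if t = "\\d+".toList ∨ (rest.takeWhile (· = t)).isEmpty then [] else ['+']),
             ap2, some t)).1 := by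
          rw [List.foldl_append, hrunEq]
      _ = r ++ t ++ (if t = "\\d+".toList ∨ (rest.takeWhile (· = t)).isEmpty then [] else ['+'])
            ++ (pvGroupEmit (rest.dropWhile (· = t))).flatten := ih _ _ _ hrest2
      _ = r ++ (pvGroupEmit (t :: rest)).flatten := by
          rw [pvGroupEmit]
          simp only [List.flatten_cons]
          by_cases hcond : t = "\\d+".toList ∨ ((rest.takeWhile (· = t)).isEmpty = true)
          · rw [if_pos hcond, if_pos hcond]
            simp
          · rw [if_neg hcond, if_neg hcond]
            simp [List.append_assoc]

theorem pvMakeregex_eq (text : List Char) : pvMakeregexA text = pvMakeregexB text := by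
  unfold pvMakeregexA pvMakeregexB
  have h1 : text.foldl pvMkAStep ([], false, none) =
      (text.map pvToken).foldl pvStepT ([], false, none) := by
    rw [List.foldl_map]
    congr 1
    funext st ch
    exact pvMkAStep_eq st ch
  rw [h1, pvFoldT_group (text.map pvToken) [] false none (by intro t _ h; simp at h)]
  simp

-- main outer-loop correspondence: A's regex accumulator is the flatten of B's pieces
theorem pvOuter_eq (valueDict : List (String × String)) (line : String) :
    ∀ (fs : List (String × Int)) (lastpos : Int) (ex regex : List Char) (pieces : List (List Char)),
      regex = pieces.flatten →
      (fs.foldl (fun (st : Int × List Char × List Char) fp =>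
        let lastpos0 := st.1
        let extractions := st.2.1
        let regex := st.2.2
        let field0 := fp.1
        let value := ((PySem.Dict.mk valueDict).get? field0).getD ""
        let field := if field0 = "month" ∧ ¬ (PySem.Str.strIsdigit value = true) then "litmonth" else field0
        let start := fp.2
        let lastpos := if lastpos0 = 0 ∧ start - lastpos0 > pvMAXPREFIX then start - pvMAXPREFIX else lastpos0
        let prefixregex := pvMakeregexA (PySem.List.slice line.toList (some lastpos) (some start))
        let valueregex := pvMakeregexA value.toList
        (start + (value.toList.length : Int),
         extractions ++ field.toList ++ [','],
         regex ++ prefixregex ++ "(?P<".toList ++ field.toList ++ ">".toList ++ valueregex ++ ")".toList))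
        (lastpos, ex, regex)).2.2 =
      ((fs.foldl (fun (st : Int × List (List Char)) fp =>
        let lastpos := st.1
        let field := fp.1
        let pos := fp.2
        let value := ((PySem.Dict.mk valueDict).get? field).getD ""
        let name := if field = "month" ∧ ¬ (PySem.Str.strIsdigit value = true) then "litmonth" else field
        let cut := if lastpos = 0 ∧ pos > pvMAXPREFIX then pos - pvMAXPREFIX else lastpos
        let piece := pvMakeregexB (PySem.List.slice line.toList (some cut) (some pos)) ++
          "(?P<".toList ++ name.toList ++ ">".toList ++ pvMakeregexB value.toList ++ ")".toList
        (pos + (value.toList.length : Int), st.2 ++ [piece])) (lastpos, pieces)).2).flatten := by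
  intro fs
  induction fs with
  | nil =>
    intro lastpos ex regex pieces hinv
    simpa using hinv
  | cons fp fs ih =>
    intro lastpos ex regex pieces hinv
    simp only [List.foldl_cons]
    apply ih
    have hclamp : (if lastpos = 0 ∧ fp.2 - lastpos > pvMAXPREFIX then fp.2 - pvMAXPREFIX else lastpos)
        = (if lastpos = 0 ∧ fp.2 > pvMAXPREFIX then fp.2 - pvMAXPREFIX else lastpos) := by
      by_cases h0 : lastpos = 0
      · subst h0; simp
      · simp [h0]
    simp [hinv, hclamp, pvMakeregex_eq, List.flatten_append, List.append_assoc]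

-- ===== VERDICT (by name: the statement is the Claim_ definition above) =====
theorem buildPythonRegex_spec : Claim_equal_buildPythonRegex := by
  intro fieldAndPos valueDict line _ _
  unfold Spec_buildPythonRegex buildPythonRegex buildPythonRegex_alt
  exact congrArg String.ofList (pvOuter_eq valueDict line fieldAndPos 0 [] [] [] rfl)
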